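-- pv_equiv track=rewrite | github.com/PetrovDE/chat-service | app/services/chat_orchestrator.py | _chunk_text_blocks
-- ===== SOURCE A (Python) =====
-- from typing import Any, Dict, List, Optional, Tuple
--
-- def _chunk_text_blocks(blocks: List[str], max_chars: int) -> List[List[str]]:
--     groups: List[List[str]] = []
--     current: List[str] = []
--     used = 0
--     separator_size = len("\n\n=====\n\n")
--
--     for block in blocks:
--         add = len(block) + (separator_size if current else 0)
--         if current and (used + add) > max_chars:
--             groups.append(current)
--             current = []
--             used = 0
--             add = len(block)
--
--         current.append(block)
--         used += add
--
--     if current: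
--         groups.append(current)
--
--     return groups
-- ===== SOURCE B (Python) =====
-- from typing import List
--
-- SEP = "\n\n=====\n\n"
--
-- def _chunk_text_blocks(blocks: List[str], max_chars: int) -> List[List[str]]:
--     # Repeatedly take the maximal prefix of the remaining blocks that fits
--     # within max_chars (counting len(SEP) between blocks), slice it off.
--     sep_len = len(SEP)
--     groups: List[List[str]] = []
--     i, n = 0, len(blocks)
--     while i < n:
--         total = len(blocks[i])
--         j = i + 1
--         while j < n and total + sep_len + len(blocks[j]) <= max_chars:
--             total += sep_len + len(blocks[j])
--             j += 1
--         groups.append(blocks[i:j])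
--         i = j
--     return groups
-- ===== Notes on version B (the rewrite author's own statement) =====
-- stated objective: alternative
-- what changed: Replaces A's single fold that threads a (groups, current, used) accumulator state with a maximal-prefix algorithm: an outer loop over group start indices with an inner scan that extends the group while it still fits, emitting each group as a slice blocks[i:j].
import Mathlib
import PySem

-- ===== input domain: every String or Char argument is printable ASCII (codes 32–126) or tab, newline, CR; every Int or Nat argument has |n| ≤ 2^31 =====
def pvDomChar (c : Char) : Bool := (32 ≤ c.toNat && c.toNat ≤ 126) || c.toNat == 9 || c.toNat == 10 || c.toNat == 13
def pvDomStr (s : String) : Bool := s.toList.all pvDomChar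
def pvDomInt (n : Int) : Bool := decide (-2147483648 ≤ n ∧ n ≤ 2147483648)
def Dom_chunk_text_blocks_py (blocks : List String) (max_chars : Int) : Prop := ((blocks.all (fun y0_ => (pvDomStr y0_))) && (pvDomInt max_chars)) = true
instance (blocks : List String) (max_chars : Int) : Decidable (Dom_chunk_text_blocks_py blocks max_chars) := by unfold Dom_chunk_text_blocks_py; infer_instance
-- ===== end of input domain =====

-- B replaces A's single accumulator fold with a maximal-prefix algorithm: repeatedly take
-- the longest prefix of the remaining blocks that fits in max_chars, slice it off.
-- Equivalence of the RETURN value; neither version mutates its arguments.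

-- ===== PORT A =====
-- one loop step of A: state is (groups, current, used)
def chunkStepA (max_chars separator_size : Int)
    (st : List (List String) × List String × Int) (block : String) :
    List (List String) × List String × Int :=
  let add := PySem.Str.len block + (if st.2.1 = [] then 0 else separator_size)
  if st.2.1 ≠ [] ∧ st.2.2 + add > max_chars then
    (st.1 ++ [st.2.1], [block], PySem.Str.len block)
  else
    (st.1, st.2.1 ++ [block], st.2.2 + add)

def chunk_text_blocks_py (blocks : List String) (max_chars : Int) : List (List String) :=
  let separator_size := PySem.Str.len "\n\n=====\n\n"
  let st := blocks.foldl (chunkStepA max_chars separator_size) ([], [], 0)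
  if st.2.1 ≠ [] then st.1 ++ [st.2.1] else st.1

-- ===== PORT B =====
-- B's inner scan: extend the group while the next block still fits.
-- Returns (taken blocks, remaining blocks); the index pair (i, j) of the Python
-- becomes consuming the list of remaining blocks, which is exact.
def chunkGrab (max_chars sep_len total : Int) : List String → List String × List String
  | [] => ([], [])
  | b :: tl =>
    if total + sep_len + PySem.Str.len b ≤ max_chars then
      let r := chunkGrab max_chars sep_len (total + sep_len + PySem.Str.len b) tl
      (b :: r.1, r.2)
    else
      ([], b :: tl)

lemma chunkGrab_rest_le (max_chars sep_len total : Int) (l : List String) :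
    (chunkGrab max_chars sep_len total l).2.length ≤ l.length := by
  induction l generalizing total with
  | nil => simp [chunkGrab]
  | cons b tl ih =>
    simp only [chunkGrab]
    split
    · exact Nat.le_succ_of_le (ih _)
    · simp

-- B's outer loop: one group per iteration (while i < n).
def chunkOuter (max_chars sep_len : Int) : List String → List (List String)
  | [] => []
  | b :: tl =>
    let r := chunkGrab max_chars sep_len (PySem.Str.len b) tl
    (b :: r.1) :: chunkOuter max_chars sep_len r.2
termination_by l => l.length
decreasing_by
  exact Nat.lt_succ_of_le (chunkGrab_rest_le max_chars sep_len (PySem.Str.len b) tl)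

def chunk_text_blocks_py_alt (blocks : List String) (max_chars : Int) : List (List String) :=
  chunkOuter max_chars (PySem.Str.len "\n\n=====\n\n") blocks

-- ===== PRECONDITION & SPEC =====
def Spec_chunk_text_blocks_py (blocks : List String) (max_chars : Int) (out : List (List String)) : Prop := out = chunk_text_blocks_py_alt blocks max_chars
instance (blocks : List String) (max_chars : Int) (out : List (List String)) : Decidable (Spec_chunk_text_blocks_py blocks max_chars out) := by unfold Spec_chunk_text_blocks_py; infer_instance

-- ===== CLAIM (what is proved, stated in full; the proofs are below) =====
def Claim_equal_chunk_text_blocks_py : Prop := ∀ (blocks : List String) (max_chars : Int), Dom_chunk_text_blocks_py blocks max_chars → Spec_chunk_text_blocks_py blocks max_chars (chunk_text_blocks_py blocks max_chars)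

-- ===== LEMMAS AND PROOFS =====

-- closing step of A: flush the non-empty current group
def chunkFinish (st : List (List String) × List String × Int) : List (List String) :=
  if st.2.1 ≠ [] then st.1 ++ [st.2.1] else st.1

-- A's loop from a mid-state (nonempty current, used = total) equals the already
-- emitted groups followed by B's continuation from that total.
lemma fold_agree (max_chars : Int) (blocks : List String) :
    ∀ (groups : List (List String)) (cur : List String) (used : Int), cur ≠ [] →
    chunkFinish (blocks.foldl (chunkStepA max_chars 9) (groups, cur, used))
      = groups ++ ((cur ++ (chunkGrab max_chars 9 used blocks).1)
          :: chunkOuter max_chars 9 (chunkGrab max_chars 9 used blocks).2) := by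
  induction blocks with
  | nil =>
    intro groups cur used hc
    simp [chunkFinish, chunkGrab, chunkOuter, hc]
  | cons b tl ih =>
    intro groups cur used hc
    simp only [List.foldl_cons, chunkStepA, hc, if_neg, ne_eq, not_false_eq_true, true_and]
    by_cases hgt : used + (PySem.Str.len b + 9) > max_chars
    · rw [if_pos hgt]
      rw [ih _ [b] _ (by simp)]
      have hg : chunkGrab max_chars 9 used (b :: tl) = ([], b :: tl) := by
        simp only [chunkGrab]
        rw [if_neg (by omega)]
      rw [hg]
      simp [chunkOuter, List.append_assoc]
    · rw [if_neg hgt]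
      rw [ih _ (cur ++ [b]) _ (by simp)]
      have hg : chunkGrab max_chars 9 used (b :: tl)
          = (b :: (chunkGrab max_chars 9 (used + 9 + PySem.Str.len b) tl).1,
             (chunkGrab max_chars 9 (used + 9 + PySem.Str.len b) tl).2) := by
        simp only [chunkGrab]
        rw [if_pos (by omega)]
      rw [hg]
      have harith : used + (PySem.Str.len b + 9) = used + 9 + PySem.Str.len b := by ring
      rw [harith]
      simp [List.append_assoc]

-- ===== VERDICT (by name: the statement is the Claim_ definition above) =====
theorem chunk_text_blocks_py_spec : Claim_equal_chunk_text_blocks_py := by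
  intro blocks max_chars _
  have hsep : PySem.Str.len "\n\n=====\n\n" = 9 := by decide
  simp only [Spec_chunk_text_blocks_py, chunk_text_blocks_py, chunk_text_blocks_py_alt, hsep]
  cases blocks with
  | nil => simp [chunkOuter]
  | cons b tl =>
    show chunkFinish (List.foldl (chunkStepA max_chars 9) ([], [], 0) (b :: tl)) = _
    rw [List.foldl_cons]
    have h1 : chunkStepA max_chars 9 ([], [], 0) b = ([], [b], PySem.Str.len b) := by
      simp [chunkStepA]
    rw [h1, fold_agree max_chars tl [] [b] (PySem.Str.len b) (by simp)]
    simp [chunkOuter]
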